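-- pv_equiv track=rewrite | github.com/ameymn/RAG | app/services/extractor.py | find_caption
-- ===== SOURCE A (Python) =====
-- from typing import List, Tuple, Optional
--
-- def find_caption(page_text: str, image_index_hint: Optional[int]) -> Optional[str]:
--     """Find caption for the image based on its index in the page text."""
--     lines = page_text.split('\n')
--     image_count = 0
--
--     for line in lines:
--         if line.strip() == "":
--             continue
--         if "Figure" in line or "Fig." in line:
--             if image_count == image_index_hint:
--                 return line.strip()
--             image_count += 1
--
--     return None
-- ===== SOURCE B (Python) =====
-- def _is_caption(line):
--     return ('Figure' in line or 'Fig.' in line) and line.strip() != ''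
--
-- def find_caption(page_text, image_index_hint):
--     """Stream over characters (no line list), testing each completed line buffer;
--     count down from the hint."""
--     if image_index_hint is None or image_index_hint < 0:
--         return None
--     remaining = image_index_hint
--     buf = []
--     for ch in page_text:
--         if ch == '\n':
--             line = ''.join(buf)
--             buf = []
--             if _is_caption(line):
--                 if remaining == 0:
--                     return line.strip()
--                 remaining -= 1
--         else:
--             buf.append(ch)
--     line = ''.join(buf)
--     if _is_caption(line) and remaining == 0:
--         return line.strip()
--     return None
-- ===== Notes on version B (the rewrite author's own statement) =====
-- stated objective: alternative
-- what changed: Replaces A's split-into-a-line-list plus upward-counting scan with a character-level streaming scan that accumulates the current line in a buffer, never materialises the line list, guards None/negative hints up front and counts down from the hint.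
import Mathlib
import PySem

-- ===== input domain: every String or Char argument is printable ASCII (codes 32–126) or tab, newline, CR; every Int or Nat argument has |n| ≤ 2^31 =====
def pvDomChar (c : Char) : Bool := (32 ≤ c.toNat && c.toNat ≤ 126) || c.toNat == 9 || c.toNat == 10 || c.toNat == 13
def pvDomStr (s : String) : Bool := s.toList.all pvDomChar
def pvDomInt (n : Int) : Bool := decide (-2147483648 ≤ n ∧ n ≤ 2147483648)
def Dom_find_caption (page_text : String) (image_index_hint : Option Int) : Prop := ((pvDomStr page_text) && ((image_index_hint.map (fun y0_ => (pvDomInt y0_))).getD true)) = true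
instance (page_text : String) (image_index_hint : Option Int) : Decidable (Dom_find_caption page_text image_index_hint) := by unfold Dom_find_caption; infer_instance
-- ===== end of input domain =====

-- B replaces A's split-into-a-line-list plus upward-counting scan with a character-level
-- streaming scan (line buffer, countdown from the hint, up-front None/negative guard): alternative decomposition, same cost.

-- ===== PORT A =====
-- page_text.split('\n')  (exact: PySem.Chars.splitOn on the char list)
def splitLines (s : String) : List String :=
  (PySem.Chars.splitOn s.toList ['\n']).map String.ofList

-- literal transcription of A's for-loop with the running image_count
def findCaptionLoop (lines : List String) (count : Int) (hint : Option Int) : Option String :=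
  match lines with
  | [] => none
  | l :: rest =>
    if PySem.Str.strip l = "" then findCaptionLoop rest count hint
    else if PySem.Str.isIn "Figure" l || PySem.Str.isIn "Fig." l then
      -- Python: image_count == image_index_hint (int == None is False, so: hint = some count)
      if hint = some count then some (PySem.Str.strip l)
      else findCaptionLoop rest (count + 1) hint
    else findCaptionLoop rest count hint

def find_caption (page_text : String) (image_index_hint : Option Int) : Option String :=
  findCaptionLoop (splitLines page_text) 0 image_index_hint

-- ===== PORT B =====
-- _is_caption(line): ('Figure' in line or 'Fig.' in line) and line.strip() != ''
def isCaption (line : String) : Bool :=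
  (PySem.Str.isIn "Figure" line || PySem.Str.isIn "Fig." line) && !(PySem.Str.strip line == "")

-- the for ch in page_text loop of Source B: buf is the current line buffer, remaining counts down
def bScan (cs : List Char) (buf : List Char) (remaining : Int) : Option String :=
  match cs with
  | [] =>
    -- after the loop: line = ''.join(buf); if _is_caption(line) and remaining == 0: return line.strip()
    let line := String.ofList buf
    if isCaption line && remaining == 0 then some (PySem.Str.strip line) else none
  | c :: rest =>
    if c = '\n' then
      let line := String.ofList buf
      if isCaption line then
        if remaining = 0 then some (PySem.Str.strip line)
        else bScan rest [] (remaining - 1)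
      else bScan rest [] remaining
    else bScan rest (buf ++ [c]) remaining

def find_caption_alt (page_text : String) (image_index_hint : Option Int) : Option String :=
  match image_index_hint with
  | none => none
  | some i => if i < 0 then none else bScan page_text.toList [] i

-- ===== PRECONDITION & SPEC =====
def Spec_find_caption (page_text : String) (image_index_hint : Option Int) (out : Option String) : Prop := out = find_caption_alt page_text image_index_hint
instance (page_text : String) (image_index_hint : Option Int) (out : Option String) : Decidable (Spec_find_caption page_text image_index_hint out) := by unfold Spec_find_caption; infer_instance

-- ===== CLAIM =====
def Claim_equal_find_caption : Prop := ∀ (page_text : String) (image_index_hint : Option Int), Dom_find_caption page_text image_index_hint → Spec_find_caption page_text image_index_hint (find_caption page_text image_index_hint)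

-- ===== LEMMAS AND PROOFS =====

-- the list of lines of cs when pre is the (already read) start of the first line
def linesCh (pre : List Char) : List Char → List (List Char)
  | [] => [pre]
  | c :: rest => if c = '\n' then pre :: linesCh [] rest else linesCh (pre ++ [c]) rest

-- the caption lines of a line list, as A selects them
def capsS (lines : List String) : List String :=
  lines.filterMap (fun l =>
    if PySem.Str.strip l ≠ "" ∧ (PySem.Str.isIn "Figure" l ∨ PySem.Str.isIn "Fig." l)
    then some (PySem.Str.strip l) else none)

lemma capsS_cons_skip (l : String) (rest : List String)
    (h : ¬ (PySem.Str.strip l ≠ "" ∧ (PySem.Str.isIn "Figure" l ∨ PySem.Str.isIn "Fig." l))) :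
    capsS (l :: rest) = capsS rest := by
  simp only [capsS, List.filterMap_cons, if_neg h]

lemma capsS_cons_keep (l : String) (rest : List String)
    (h : PySem.Str.strip l ≠ "" ∧ (PySem.Str.isIn "Figure" l ∨ PySem.Str.isIn "Fig." l)) :
    capsS (l :: rest) = PySem.Str.strip l :: capsS rest := by
  simp only [capsS, List.filterMap_cons, if_pos h]

lemma loop_none (lines : List String) (c : Int) :
    findCaptionLoop lines c none = none := by
  induction lines generalizing c with
  | nil => rfl
  | cons l rest ih =>
    simp only [findCaptionLoop]
    split_ifs with h1 h2 h3
    · exact ih c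
    · exact absurd h3 (by simp)
    · exact ih (c + 1)
    · exact ih c

lemma loop_some (lines : List String) (c i : Int) :
    findCaptionLoop lines c (some i) =
      if c ≤ i then (capsS lines)[(i - c).toNat]? else none := by
  induction lines generalizing c with
  | nil => simp [findCaptionLoop, capsS]
  | cons l rest ih =>
    by_cases h1 : PySem.Str.strip l = ""
    · rw [show findCaptionLoop (l :: rest) c (some i) = findCaptionLoop rest c (some i) from by
        simp only [findCaptionLoop, if_pos h1]]
      rw [capsS_cons_skip l rest (by simp [h1]), ih]
    · by_cases h2 : (PySem.Str.isIn "Figure" l || PySem.Str.isIn "Fig." l) = true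
      · have hkeep := capsS_cons_keep l rest ⟨h1, by simpa using h2⟩
        by_cases h3 : (some i : Option Int) = some c
        · have hic : i = c := Option.some.inj h3
          rw [show findCaptionLoop (l :: rest) c (some i) = some (PySem.Str.strip l) from by
            simp only [findCaptionLoop, if_neg h1, if_pos h2, if_pos h3]]
          rw [hkeep]
          subst hic
          simp
        · rw [show findCaptionLoop (l :: rest) c (some i) = findCaptionLoop rest (c + 1) (some i) from by
            simp only [findCaptionLoop, if_neg h1, if_pos h2, if_neg h3]]
          rw [ih, hkeep]
          have hic : i ≠ c := fun h => h3 (by rw [h])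
          by_cases hc : c ≤ i
          · have hc1 : c + 1 ≤ i := by omega
            have ht : (i - c).toNat = (i - (c + 1)).toNat + 1 := by omega
            simp [hc, hc1, ht]
          · have hc1 : ¬ c + 1 ≤ i := by omega
            simp [hc, hc1]
      · rw [show findCaptionLoop (l :: rest) c (some i) = findCaptionLoop rest c (some i) from by
          simp only [findCaptionLoop, if_neg h1, if_neg h2]]
        rw [capsS_cons_skip l rest
          (fun hcon => h2 (by simpa using hcon.2)), ih]

-- splitOn by '\n' is linesCh
lemma go_spec (fuel : Nat) : ∀ (l cur : List Char) (acc : List (List Char)), l.length < fuel →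
    PySem.Chars.splitOn.go ['\n'] fuel l cur acc = acc.reverse ++ linesCh cur.reverse l := by
  induction fuel with
  | zero => intro l cur acc h; omega
  | succ fuel ih =>
    intro l cur acc h
    match l with
    | [] => simp [PySem.Chars.splitOn.go, linesCh]
    | c :: rest =>
      by_cases hc : c = '\n'
      · subst hc
        rw [show PySem.Chars.splitOn.go ['\n'] (fuel + 1) ('\n' :: rest) cur acc
              = PySem.Chars.splitOn.go ['\n'] fuel rest [] (cur.reverse :: acc) from by
          simp [PySem.Chars.splitOn.go, List.isPrefixOf]]
        rw [ih rest [] (cur.reverse :: acc) (by simpa using Nat.lt_of_succ_lt_succ h)]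
        simp [linesCh]
      · rw [show PySem.Chars.splitOn.go ['\n'] (fuel + 1) (c :: rest) cur acc
              = PySem.Chars.splitOn.go ['\n'] fuel rest (c :: cur) acc from by
          simp [PySem.Chars.splitOn.go, List.isPrefixOf, Ne.symm hc]]
        rw [ih rest (c :: cur) acc (by simpa using Nat.lt_of_succ_lt_succ h)]
        simp [linesCh, hc]

lemma splitOn_eq_linesCh (cs : List Char) :
    PySem.Chars.splitOn cs ['\n'] = linesCh [] cs := by
  have h := go_spec (cs.length + 1) cs [] [] (by omega)
  simpa [PySem.Chars.splitOn] using h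

-- A's selection condition equals B's boolean test
lemma cond_iff (l : String) :
    (PySem.Str.strip l ≠ "" ∧ (PySem.Str.isIn "Figure" l ∨ PySem.Str.isIn "Fig." l))
      ↔ isCaption l = true := by
  simp only [isCaption, Bool.and_eq_true, Bool.or_eq_true, Bool.not_eq_true', beq_eq_false_iff_ne]
  tauto

-- B's streaming scan computes the k-th caption of the remaining lines
lemma bScan_eq (cs : List Char) : ∀ (buf : List Char) (k : Int), 0 ≤ k →
    bScan cs buf k = (capsS ((linesCh buf cs).map String.ofList))[k.toNat]? := by
  induction cs with
  | nil =>
    intro buf k hk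
    simp only [linesCh, List.map_cons, List.map_nil]
    by_cases hcap : isCaption (String.ofList buf) = true
    · rw [capsS_cons_keep _ _ ((cond_iff _).mpr hcap)]
      by_cases hk0 : k = 0
      · subst hk0; simp [bScan, hcap, capsS]
      · have : k.toNat = (k.toNat - 1) + 1 := by omega
        rw [this]
        simp [bScan, hcap, hk0, capsS]
    · rw [capsS_cons_skip _ _ (fun h => hcap ((cond_iff _).mp h))]
      simp [bScan, hcap, capsS]
  | cons c rest ih =>
    intro buf k hk
    by_cases hc : c = '\n'
    · subst hc
      rw [show linesCh buf ('\n' :: rest) = buf :: linesCh [] rest from by simp [linesCh]]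
      simp only [List.map_cons]
      by_cases hcap : isCaption (String.ofList buf) = true
      · rw [capsS_cons_keep _ _ ((cond_iff _).mpr hcap)]
        by_cases hk0 : k = 0
        · subst hk0; simp [bScan, hcap]
        · have h1 : bScan ('\n' :: rest) buf k = bScan rest [] (k - 1) := by
            simp [bScan, hcap, hk0]
          rw [h1, ih [] (k - 1) (by omega)]
          have ht : k.toNat = (k - 1).toNat + 1 := by omega
          rw [ht]
          simp
      · rw [capsS_cons_skip _ _ (fun h => hcap ((cond_iff _).mp h))]
        have h1 : bScan ('\n' :: rest) buf k = bScan rest [] k := by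
          simp [bScan, hcap]
        rw [h1, ih [] k hk]
    · have h1 : bScan (c :: rest) buf k = bScan rest (buf ++ [c]) k := by
        simp [bScan, hc]
      rw [h1, ih (buf ++ [c]) k hk]
      simp [linesCh, hc]

-- ===== VERDICT =====
theorem find_caption_spec : Claim_equal_find_caption := by
  intro page_text hint _
  unfold Spec_find_caption find_caption find_caption_alt
  match hint with
  | none => simp [loop_none]
  | some i =>
    rw [loop_some]
    have hm : (match some i with
        | none => (none : Option String)
        | some i => if i < 0 then none else bScan page_text.toList [] i)
        = if i < 0 then none else bScan page_text.toList [] i := rfl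
    rw [hm]
    by_cases h0 : 0 ≤ i
    · have hneg : ¬ i < 0 := by omega
      rw [if_pos h0, if_neg hneg, bScan_eq page_text.toList [] i h0]
      simp [splitLines, splitOn_eq_linesCh, Int.sub_zero]
    · have hneg : i < 0 := by omega
      rw [if_neg h0, if_pos hneg]
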